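-- pv_equiv track=rewrite | github.com/xkLi-Allen/OmniDock | protein/stage4_skempi_v14.py | _low_complexity_windows
-- ===== SOURCE A (Python) =====
-- def _low_complexity_windows(seq, window=6, unique_thresh=3):
--     if len(seq) < window:
--         return 0
--     cnt = 0
--     for i in range(len(seq) - window + 1):
--         if len(set(seq[i:i + window])) <= unique_thresh:
--             cnt += 1
--     return cnt
-- ===== SOURCE B (Python) =====
-- def _low_complexity_windows(seq, window=6, unique_thresh=3):
--     n = len(seq)
--     if n < window:
--         return 0
--     freq = {}
--     distinct = 0
--     cnt = 0
--     for i, ch in enumerate(seq):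
--         c = freq.get(ch, 0)
--         if c == 0:
--             distinct += 1
--         freq[ch] = c + 1
--         if i >= window:
--             out = seq[i - window]
--             freq[out] -= 1
--             if freq[out] == 0:
--                 distinct -= 1
--         if i >= window - 1 and distinct <= unique_thresh:
--             cnt += 1
--     return cnt
-- ===== Notes on version B (the rewrite author's own statement) =====
-- stated objective: faster
-- what changed: A rebuilds a set for every window (O(n*window)); B slides a frequency dict over the string once, updating a running distinct-count incrementally (O(n)).
-- outside the precondition, e.g. on _low_complexity_windows('abc', 0, 3): A returns 4, B returns 3; on _low_complexity_windows('abc', -2, 0): A returns 4, B raises KeyError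
import Mathlib
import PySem

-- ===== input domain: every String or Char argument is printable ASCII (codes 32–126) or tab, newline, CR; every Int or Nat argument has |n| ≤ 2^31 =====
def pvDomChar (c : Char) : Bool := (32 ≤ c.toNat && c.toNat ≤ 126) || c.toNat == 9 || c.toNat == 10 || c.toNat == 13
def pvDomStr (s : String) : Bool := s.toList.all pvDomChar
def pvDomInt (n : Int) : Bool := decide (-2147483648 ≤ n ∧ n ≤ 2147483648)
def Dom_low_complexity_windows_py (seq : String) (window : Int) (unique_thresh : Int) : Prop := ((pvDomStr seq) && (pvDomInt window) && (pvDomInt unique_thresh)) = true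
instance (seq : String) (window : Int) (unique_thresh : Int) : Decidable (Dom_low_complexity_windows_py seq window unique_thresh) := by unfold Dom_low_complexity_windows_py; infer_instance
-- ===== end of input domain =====

-- B replaces A's per-window set construction by one sliding-window frequency dict with an
-- incremental distinct-count (asymptotically faster as measured); Pre_ restricts to the
-- natural domain window >= 1 (on non-positive windows A's counts are artefacts of Python slicing).


-- ===== PORT A =====
def low_complexity_windows_py (seq : String) (window : Int) (unique_thresh : Int) : Int :=
  if (seq.toList.length : Int) < window then 0
  else
    (PySem.List.pyRange 0 ((seq.toList.length : Int) - window + 1) 1).foldl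
      (fun cnt i =>
        if ((PySem.Set.ofList (PySem.List.slice seq.toList (some i) (some (i + window)))).length : Int) ≤ unique_thresh
        then cnt + 1 else cnt) 0

-- ===== PORT B =====
-- the body of B's for-loop, as a helper (state = (freq, distinct, cnt), element = (i, ch))
def pvAltStep (l : List Char) (window unique_thresh : Int)
    (st : PySem.Dict Char Int × Int × Int) (p : Int × Char) : PySem.Dict Char Int × Int × Int :=
  let freq := st.1
  let distinct := st.2.1
  let cnt := st.2.2
  let i := p.1
  let ch := p.2
  let c := freq.getD ch 0
  let distinct := if c = 0 then distinct + 1 else distinct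
  let freq := freq.insert ch (c + 1)
  let st2 :=
    if window ≤ i then
      let out := PySem.List.pyGetD l (i - window) ' '   -- seq[i - window]; in range whenever 1 ≤ window
      let freq := freq.insert out (freq.getD out 0 - 1)
      let distinct := if freq.getD out 0 = 0 then distinct - 1 else distinct
      (freq, distinct)
    else (freq, distinct)
  let cnt := if window - 1 ≤ i ∧ st2.2 ≤ unique_thresh then cnt + 1 else cnt
  (st2.1, st2.2, cnt)

def low_complexity_windows_py_alt (seq : String) (window : Int) (unique_thresh : Int) : Int :=
  if (seq.toList.length : Int) < window then 0
  else
    ((PySem.List.enumerate seq.toList 0).foldl (pvAltStep seq.toList window unique_thresh)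
      (PySem.Dict.empty, 0, 0)).2.2

-- ===== PRECONDITION & SPEC =====
-- Pre_ keeps the natural domain window ≥ 1: for window ≤ 0 A still returns (via Python's
-- negative/empty slices) but those counts are slicing artefacts, and B raises for window < 0.
def Pre_low_complexity_windows_py (seq : String) (window : Int) (unique_thresh : Int) : Prop := 1 ≤ window
instance (seq : String) (window : Int) (unique_thresh : Int) : Decidable (Pre_low_complexity_windows_py seq window unique_thresh) := by unfold Pre_low_complexity_windows_py; infer_instance

def pvWitness_low_complexity_windows_py : String × Int × Int := ("abcab", 2, 1)

def Spec_low_complexity_windows_py (seq : String) (window : Int) (unique_thresh : Int) (out : Int) : Prop := out = low_complexity_windows_py_alt seq window unique_thresh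
instance (seq : String) (window : Int) (unique_thresh : Int) (out : Int) : Decidable (Spec_low_complexity_windows_py seq window unique_thresh out) := by unfold Spec_low_complexity_windows_py; infer_instance

-- ===== CLAIM (what is proved, stated in full; the proofs are below) =====
def Claim_equal_low_complexity_windows_py : Prop := ∀ (seq : String) (window : Int) (unique_thresh : Int), Dom_low_complexity_windows_py seq window unique_thresh → Pre_low_complexity_windows_py seq window unique_thresh → Spec_low_complexity_windows_py seq window unique_thresh (low_complexity_windows_py seq window unique_thresh)

-- ===== LEMMAS AND PROOFS =====

-- the window of text B's dict describes after the first k characters: indices [k-w, k)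
def pvWin (l : List Char) (w k : Nat) : List Char := (l.take k).drop (k - w)

-- B's loop invariant after processing the first k characters
def pvInv (l : List Char) (w : Nat) (t : Int) (k : Nat)
    (st : PySem.Dict Char Int × Int × Int) : Prop :=
  (∀ c, st.1.getD c 0 = ((pvWin l w k).count c : Int))
  ∧ st.2.1 = (((pvWin l w k).toFinset.card : Int))
  ∧ st.2.2 = (((List.range k).countP
      (fun j => decide (w ≤ j + 1 ∧ (((pvWin l w (j+1)).toFinset.card : Int) ≤ t)))) : Int)

lemma pvWin_succ_lt (l : List Char) (w k : Nat) (hk : k < l.length) (hkw : k < w) :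
    pvWin l w (k+1) = pvWin l w k ++ [l[k]] := by
  unfold pvWin
  have h0 : k + 1 - w = 0 := by omega
  have h1 : k - w = 0 := by omega
  rw [h0, h1, List.take_add_one, List.getElem?_eq_getElem hk]
  simp

lemma pvWin_head (l : List Char) (w k : Nat) (hw : 1 ≤ w) (hk : k < l.length) (hkw : w ≤ k) :
    pvWin l w k = l[k-w]'(by omega) :: (l.take k).drop (k - w + 1) := by
  unfold pvWin
  rw [List.drop_eq_getElem_cons (by simp; omega)]
  congr 1
  simp [hk]

lemma pvWin_succ_ge (l : List Char) (w k : Nat) (hw : 1 ≤ w) (hk : k < l.length) (hkw : w ≤ k) :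
    pvWin l w (k+1) = (l.take k).drop (k - w + 1) ++ [l[k]] := by
  unfold pvWin
  have h0 : k + 1 - w = k - w + 1 := by omega
  rw [h0, List.take_add_one, List.getElem?_eq_getElem hk,
    List.drop_append_of_le_length (by simp; omega)]
  simp

lemma pvDistinct_append (s : List Char) (x : Char) :
    (((s ++ [x]).toFinset.card : Int))
      = (s.toFinset.card : Int) + (if (s.count x : Int) = 0 then 1 else 0) := by
  have hset : (s ++ [x]).toFinset = insert x s.toFinset := by ext c; simp [or_comm]
  rw [hset]
  by_cases hx : x ∈ s
  · have hc : s.count x ≠ 0 := by simpa [List.count_eq_zero] using hx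
    rw [Finset.insert_eq_self.mpr (List.mem_toFinset.mpr hx)]
    simp [hc]
  · have hc : s.count x = 0 := by simpa [List.count_eq_zero] using hx
    rw [Finset.card_insert_of_notMem (by simpa using hx)]
    simp [hc]

lemma pvDistinct_rot (a : Char) (s : List Char) (x : Char) :
    (((s ++ [x]).toFinset.card : Int))
      = ((((a :: s).toFinset.card : Int) + (if ((a :: s).count x : Int) = 0 then 1 else 0))
         - (if ((s ++ [x]).count a : Int) = 0 then 1 else 0)) := by
  have h1 : (s ++ [x]).toFinset = insert x s.toFinset := by ext c; simp [or_comm]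
  have h2 : (a :: s).toFinset = insert a s.toFinset := by simp
  rw [h1, h2]
  rcases eq_or_ne x a with hxa | hxa
  · have hc1 : (a :: s).count x ≠ 0 := by simp [List.count_cons, hxa]
    have hc2 : (s ++ [x]).count a ≠ 0 := by simp [List.count_append, hxa]
    rw [if_neg (by exact_mod_cast hc1), if_neg (by exact_mod_cast hc2), hxa]
    omega
  · by_cases hxs : x ∈ s
    · have hc1 : (a :: s).count x ≠ 0 := by
        simp [List.count_eq_zero, List.mem_cons, hxs]
      rw [if_neg (by exact_mod_cast hc1),
          Finset.insert_eq_self.mpr (List.mem_toFinset.mpr hxs)]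
      by_cases has : a ∈ s
      · have hc2 : (s ++ [x]).count a ≠ 0 := by
          simp [List.count_eq_zero, has]
        rw [if_neg (by exact_mod_cast hc2),
            Finset.insert_eq_self.mpr (List.mem_toFinset.mpr has)]
        omega
      · have hc2 : (s ++ [x]).count a = 0 := by
          simp [List.count_eq_zero, has, Ne.symm hxa]
        rw [if_pos (by exact_mod_cast hc2),
            Finset.card_insert_of_notMem (by simpa using has)]
        push_cast
        omega
    · have hc1 : (a :: s).count x = 0 := by
        simp [List.count_eq_zero, List.mem_cons, hxs, hxa]
      rw [if_pos (by exact_mod_cast hc1),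
          Finset.card_insert_of_notMem (by simpa using hxs)]
      by_cases has : a ∈ s
      · have hc2 : (s ++ [x]).count a ≠ 0 := by
          simp [List.count_eq_zero, has]
        rw [if_neg (by exact_mod_cast hc2),
            Finset.insert_eq_self.mpr (List.mem_toFinset.mpr has)]
        push_cast
        omega
      · have hc2 : (s ++ [x]).count a = 0 := by
          simp [List.count_eq_zero, has, Ne.symm hxa]
        rw [if_pos (by exact_mod_cast hc2),
            Finset.card_insert_of_notMem (by simpa using has)]
        push_cast
        omega

lemma pvSetLen (s : List Char) : (PySem.Set.ofList s).length = s.toFinset.card := by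
  have h2 : (PySem.Set.ofList s).toFinset = s.toFinset := by
    ext c; simp [PySem.Set.mem_ofList]
  rw [← h2]
  exact (List.toFinset_card_of_nodup (PySem.Set.nodup_ofList s)).symm

lemma pvFreqStep (f : PySem.Dict Char Int) (a x b : Char) (R : List Char)
    (hf : ∀ cc, f.getD cc 0 = (((a :: R).count cc : Int))) :
    ((f.insert x (f.getD x 0 + 1)).insert a
      ((f.insert x (f.getD x 0 + 1)).getD a 0 - 1)).getD b 0
      = (((R ++ [x]).count b : Int)) := by
  have hswap : ∀ (u v : Char), ¬ u = v → ¬ v = u := fun u v h hh => h hh.symm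
  rcases eq_or_ne a x with hax | hax
  · subst hax
    simp only [PySem.Dict.getD_insert, hf]
    by_cases hba : b = a <;>
      simp_all [List.count_append, List.count_cons] <;>
      first | omega | exact hswap _ _ hba
  · simp only [PySem.Dict.getD_insert, hf]
    by_cases hba : b = a <;> by_cases hbx : b = x <;>
      simp_all [List.count_append, List.count_cons] <;>
      first | omega | exact hswap _ _ hba | exact hswap _ _ hbx | exact hswap _ _ hax

lemma pvFreqStep0 (f : PySem.Dict Char Int) (x b : Char) (S : List Char)
    (hf : ∀ cc, f.getD cc 0 = ((S.count cc : Int))) :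
    (f.insert x (f.getD x 0 + 1)).getD b 0 = (((S ++ [x]).count b : Int)) := by
  simp only [PySem.Dict.getD_insert, hf]
  by_cases hbx : b = x <;> simp_all [List.count_append, List.count_cons] <;>
    first
      | omega
      | exact fun h => hbx (Eq.symm h)

set_option maxRecDepth 8192 in
lemma pvStep (l : List Char) (w : Nat) (t : Int) (hw : 1 ≤ w) (k : Nat) (hk : k < l.length)
    (st : PySem.Dict Char Int × Int × Int) (h : pvInv l w t k st) :
    pvInv l w t (k+1) (pvAltStep l (w : Int) t st ((k : Int), l[k])) := by
  obtain ⟨f, d, c⟩ := st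
  obtain ⟨hf, hd, hc⟩ := h
  simp only at hf hd hc
  have hcnt2 : ∀ (s : List Char) (b y : Char),
      (((y :: s).count b : Int)) = (s.count b : Int) + (if b = y then 1 else 0) := by
    intro s b y
    rcases eq_or_ne b y with hby | hby
    · simp [List.count_cons, hby]
    · simp [List.count_cons, hby, Ne.symm hby]
  by_cases hwk : w ≤ k
  · -- sliding case: drop the oldest character l[k-w], append l[k]
    have hhead := pvWin_head l w k hw hk hwk
    have hsucc := pvWin_succ_ge l w k hw hk hwk
    set a := l[k - w]'(by omega) with ha
    set R := (l.take k).drop (k - w + 1) with hR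
    set x := l[k] with hxx
    have hout : PySem.List.pyGetD l ((k : Int) - (w : Int)) ' ' = a := by
      rw [← Nat.cast_sub hwk, PySem.List.pyGetD_natCast]
      rw [List.getD_eq_getElem l ' ' (by omega)]
    rw [hhead] at hf hd
    have hfb : ∀ b, f.getD b 0 = ((R.count b : Int)) + (if b = a then 1 else 0) := by
      intro b; rw [hf b, hcnt2]
    have hf2 : ∀ b,
        ((f.insert x (f.getD x 0 + 1)).insert a
          ((f.insert x (f.getD x 0 + 1)).getD a 0 - 1)).getD b 0
        = (((R ++ [x]).count b : Int)) := by
      intro b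
      exact pvFreqStep f a x b R hf
    have hd2 : (if ((f.insert x (f.getD x 0 + 1)).insert a
            ((f.insert x (f.getD x 0 + 1)).getD a 0 - 1)).getD a 0 = 0
          then (if f.getD x 0 = 0 then d + 1 else d) - 1
          else (if f.getD x 0 = 0 then d + 1 else d))
        = (((R ++ [x]).toFinset.card : Int)) := by
      rw [hf2 a, hfb x, pvDistinct_rot a R x, hd, hcnt2]
      split_ifs <;> omega
    constructor
    · -- freq component
      intro b
      simp only [pvAltStep, if_pos (show (w : Int) ≤ (k : Int) by exact_mod_cast hwk), hout]
      rw [hsucc]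
      exact hf2 b
    constructor
    · -- distinct component
      simp only [pvAltStep, if_pos (show (w : Int) ≤ (k : Int) by exact_mod_cast hwk), hout]
      rw [hsucc]
      exact hd2
    · -- cnt component
      simp only [pvAltStep, if_pos (show (w : Int) ≤ (k : Int) by exact_mod_cast hwk), hout]
      rw [List.range_succ, List.countP_append, List.countP_cons, List.countP_nil]
      have hpredk : (decide (w ≤ k + 1 ∧ (((pvWin l w (k + 1)).toFinset.card : Int) ≤ t)))
          = decide ((((R ++ [x]).toFinset.card : Int) ≤ t)) := by
        rw [hsucc]
        simp [show w ≤ k + 1 by omega]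
      rw [hpredk, hd2]
      by_cases hle : (((R ++ [x]).toFinset.card : Int)) ≤ t
      · rw [if_pos ⟨by omega, hle⟩, if_pos (decide_eq_true hle)]
        rw [hc]; push_cast; ring
      · rw [if_neg (fun hcon => hle hcon.2), if_neg (by simpa using hle)]
        rw [hc]; push_cast; ring
  · -- prefix case: k < w, the window only grows
    have hsucc := pvWin_succ_lt l w k hk (by omega)
    set x := l[k] with hxx
    have hf1 : ∀ b, (f.insert x (f.getD x 0 + 1)).getD b 0
        = (((pvWin l w k ++ [x]).count b : Int)) := by
      intro b
      exact pvFreqStep0 f x b (pvWin l w k) hf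
    have hd1 : (if f.getD x 0 = 0 then d + 1 else d)
        = (((pvWin l w k ++ [x]).toFinset.card : Int)) := by
      rw [hf x, pvDistinct_append (pvWin l w k) x, hd]
      split_ifs <;> omega
    constructor
    · intro b
      simp only [pvAltStep,
        if_neg (show ¬ ((w : Int) ≤ (k : Int)) by exact_mod_cast hwk)]
      rw [hsucc]
      exact hf1 b
    constructor
    · simp only [pvAltStep,
        if_neg (show ¬ ((w : Int) ≤ (k : Int)) by exact_mod_cast hwk)]
      rw [hsucc]
      exact hd1
    · simp only [pvAltStep,
        if_neg (show ¬ ((w : Int) ≤ (k : Int)) by exact_mod_cast hwk)]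
      rw [List.range_succ, List.countP_append, List.countP_cons, List.countP_nil]
      by_cases hw1 : w ≤ k + 1
      · have hpredk : (decide (w ≤ k + 1 ∧ (((pvWin l w (k + 1)).toFinset.card : Int) ≤ t)))
            = decide ((((pvWin l w k ++ [x]).toFinset.card : Int) ≤ t)) := by
          rw [hsucc]; simp [hw1]
        rw [hpredk, hd1]
        by_cases hle : (((pvWin l w k ++ [x]).toFinset.card : Int)) ≤ t
        · rw [if_pos ⟨by omega, hle⟩, if_pos (decide_eq_true hle)]
          rw [hc]; push_cast; ring
        · rw [if_neg (fun hcon => hle hcon.2), if_neg (by simpa using hle)]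
          rw [hc]; push_cast; ring
      · rw [if_neg (by intro hcon; have := hcon.1; omega)]
        rw [if_neg (by simp [hw1]), hc, Nat.add_zero]

lemma pvFold (l : List Char) (w : Nat) (t : Int) (hw : 1 ≤ w) :
    ∀ (suf : List Char) (k : Nat) (st : PySem.Dict Char Int × Int × Int),
      l.take k ++ suf = l → pvInv l w t k st →
      pvInv l w t (k + suf.length)
        ((PySem.List.enumerate suf (k : Int)).foldl (pvAltStep l (w : Int) t) st) := by
  intro suf
  induction suf with
  | nil =>
    intro k st _ hinv
    simpa [PySem.List.enumerate_nil] using hinv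
  | cons x xs ih =>
    intro k st hpre hinv
    have hlen := congrArg List.length hpre
    simp only [List.length_append, List.length_take, List.length_cons] at hlen
    have hk : k < l.length := by omega
    have hx : l[k] = x := by
      have h1 : (l.take k ++ x :: xs)[k]? = some x := by
        rw [List.getElem?_append_right (by simp [List.length_take])]
        simp [List.length_take, Nat.min_eq_left (le_of_lt hk)]
      rw [hpre] at h1
      simpa [List.getElem?_eq_getElem hk] using h1
    rw [PySem.List.enumerate_cons, List.foldl_cons]
    have hstep := pvStep l w t hw k hk st hinv
    rw [hx] at hstep
    have hpre' : l.take (k + 1) ++ xs = l := by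
      rw [List.take_add_one, List.getElem?_eq_getElem hk, hx]
      simpa [List.append_assoc] using hpre
    have hres := ih (k + 1) _ hpre' hstep
    have hcast : ((k : Int) + 1) = (((k + 1 : Nat)) : Int) := by push_cast; ring
    have hlen2 : k + (x :: xs).length = (k + 1) + xs.length := by simp; omega
    rw [hlen2, hcast]
    exact hres

lemma pvReindex (w n : Nat) (q : Nat → Bool) (hw : 1 ≤ w) (hn : w ≤ n) :
    (List.range n).countP (fun j => decide (w ≤ j + 1) && q (j + 1 - w))
      = (List.range (n - w + 1)).countP q := by
  have hsplit : n = (w - 1) + (n - w + 1) := by omega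
  conv_lhs => rw [hsplit, List.range_add]
  rw [List.countP_append, List.countP_map]
  have h0 : (List.range (w - 1)).countP (fun j => decide (w ≤ j + 1) && q (j + 1 - w)) = 0 := by
    apply List.countP_eq_zero.mpr
    intro j hj
    simp only [List.mem_range] at hj
    simp [decide_eq_false (by omega : ¬ w ≤ j + 1)]
  rw [h0, Nat.zero_add]
  apply List.countP_congr
  intro j hj
  simp only [List.mem_range] at hj
  have h1 : w ≤ (w - 1) + j + 1 := by omega
  have h2 : (w - 1) + j + 1 - w = j := by omega
  simp [Function.comp, h1, h2]

-- ===== VERDICT (by name: the statement is the Claim_ definition above) =====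
theorem low_complexity_windows_py_spec : Claim_equal_low_complexity_windows_py := by
  intro seq window t _ hpre
  unfold Spec_low_complexity_windows_py
  unfold Pre_low_complexity_windows_py at hpre
  set l := seq.toList with hl
  by_cases hlt : ((l.length : Int)) < window
  · unfold low_complexity_windows_py low_complexity_windows_py_alt
    rw [← hl, if_pos hlt, if_pos hlt]
  · obtain ⟨w, hw⟩ : ∃ w : Nat, window = (w : Int) :=
      ⟨window.toNat, (Int.toNat_of_nonneg (by omega)).symm⟩
    subst hw
    have hw1 : 1 ≤ w := by exact_mod_cast hpre
    have hwn : w ≤ l.length := by exact_mod_cast not_lt.mp hlt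
    have hinv0 : pvInv l w t 0 (PySem.Dict.empty, 0, 0) := by
      refine ⟨?_, ?_, ?_⟩ <;> simp [pvWin, PySem.Dict.getD_empty]
    have hfold := pvFold l w t hw1 l 0 (PySem.Dict.empty, 0, 0) (by simp) hinv0
    have h3 := hfold.2.2
    simp only [Nat.zero_add, Nat.cast_zero] at h3
    have hB : low_complexity_windows_py_alt seq (w : Int) t
        = (((List.range l.length).countP
            (fun j => decide (w ≤ j + 1 ∧ ((((pvWin l w (j + 1)).toFinset.card : Int)) ≤ t)))) : Int) := by
      unfold low_complexity_windows_py_alt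
      rw [← hl, if_neg hlt]
      exact h3
    have hA : low_complexity_windows_py seq (w : Int) t
        = (((List.range (l.length - w + 1)).countP
            (fun i => decide ((((l.drop i).take w).toFinset.card : Int) ≤ t))) : Int) := by
      unfold low_complexity_windows_py
      rw [← hl, if_neg hlt, PySem.List.foldl_ite_add_one, zero_add]
      have hb : ((l.length : Int)) - (w : Int) + 1 = ((l.length - w + 1 : Nat) : Int) := by omega
      rw [hb, PySem.List.pyRange_zero_natCast, List.countP_map]
      congr 1
      apply List.countP_congr
      intro i _
      simp [Function.comp, PySem.List.slice_natCast_add, pvSetLen]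
    rw [hA, hB]
    congr 1
    rw [← pvReindex w l.length
      (fun z => decide ((((l.drop z).take w).toFinset.card : Int) ≤ t)) hw1 hwn]
    apply List.countP_congr
    intro j _
    by_cases hj : w ≤ j + 1
    · have hwin : pvWin l w (j + 1) = (l.drop (j + 1 - w)).take w := by
        unfold pvWin
        rw [List.drop_take]
        congr 1
        omega
      simp [hj, hwin]
    · simp [hj]
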